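-- pv_equiv track=rewrite | github.com/AnasAr96/Code_Beispiele | Lab Bioinformatik/Meine Lösungen/bioinformatik_Lab_1/lab_1_functions.py | make_intersection_Matrix_with_bool_Values_from
-- ===== SOURCE A (Python) =====
-- def make_intersection_Matrix_with_bool_Values_from(first_seq, second_seq, window_length):
--     return [
--         [
--             (first_seq[i: i + window_length] != second_seq[j: j + window_length])
--             for j in range(len(first_seq) - window_length)
--         ]
--         for i in range(len(second_seq) - window_length)
--     ]
-- ===== SOURCE B (Python) =====
-- def make_intersection_Matrix_with_bool_Values_from(first_seq, second_seq, window_length):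
--     # Index the second sequence's windows by content once, then each row needs a
--     # single dict lookup: only the cells whose windows match are set to False.
--     cols = len(first_seq) - window_length
--     rows = len(second_seq) - window_length
--     positions = {}
--     for j in range(cols):
--         positions.setdefault(second_seq[j: j + window_length], []).append(j)
--     out = []
--     for i in range(rows):
--         row = [True] * cols
--         for j in positions.get(first_seq[i: i + window_length], []):
--             row[j] = False
--         out.append(row)
--     return out
-- ===== Notes on version B (the rewrite author's own statement) =====
-- stated objective: faster
-- what changed: Instead of comparing the two window slices in every cell, B builds a dict mapping each window of the second sequence to its positions once, then fills each row with True and flips to False only the positions returned by one dict lookup on the first sequence's window.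
import Mathlib
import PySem

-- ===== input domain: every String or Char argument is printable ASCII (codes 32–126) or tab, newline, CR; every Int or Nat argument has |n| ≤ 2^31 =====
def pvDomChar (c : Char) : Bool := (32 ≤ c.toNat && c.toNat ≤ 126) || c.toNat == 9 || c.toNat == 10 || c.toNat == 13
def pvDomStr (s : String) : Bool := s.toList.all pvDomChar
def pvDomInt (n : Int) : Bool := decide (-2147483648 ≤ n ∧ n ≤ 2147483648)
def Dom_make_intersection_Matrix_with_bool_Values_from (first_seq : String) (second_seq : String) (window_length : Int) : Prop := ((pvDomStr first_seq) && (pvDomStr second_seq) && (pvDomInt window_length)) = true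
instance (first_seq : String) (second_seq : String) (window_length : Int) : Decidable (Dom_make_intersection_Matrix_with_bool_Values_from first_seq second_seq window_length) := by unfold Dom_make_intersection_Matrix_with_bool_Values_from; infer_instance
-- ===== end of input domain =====

-- B indexes the second sequence's windows in a dict once and fills each row from a
-- single lookup, instead of A's per-cell slice comparison; objective: faster.


-- ===== PORT A =====
def make_intersection_Matrix_with_bool_Values_from (first_seq : String) (second_seq : String) (window_length : Int) : List (List Bool) :=
  (PySem.List.pyRange 0 (PySem.Str.len second_seq - window_length) 1).map (fun i =>
    (PySem.List.pyRange 0 (PySem.Str.len first_seq - window_length) 1).map (fun j =>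
      decide (PySem.Str.slice first_seq (some i) (some (i + window_length)) ≠
              PySem.Str.slice second_seq (some j) (some (j + window_length)))))

-- ===== PORT B =====
def make_intersection_Matrix_with_bool_Values_from_alt (first_seq : String) (second_seq : String) (window_length : Int) : List (List Bool) :=
  let cols := PySem.Str.len first_seq - window_length
  let rows := PySem.Str.len second_seq - window_length
  -- positions.setdefault(second_seq[j:j+w], []).append(j)  =  Dict.modify with default []
  let positions : PySem.Dict String (List Int) :=
    (PySem.List.pyRange 0 cols 1).foldl
      (fun d j => d.modify (PySem.Str.slice second_seq (some j) (some (j + window_length))) [] (· ++ [j]))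
      PySem.Dict.empty
  (PySem.List.pyRange 0 rows 1).map (fun i =>
    (positions.getD (PySem.Str.slice first_seq (some i) (some (i + window_length))) []).foldl
      -- row[j] = False; every stored j comes from range(cols), so 0 ≤ j < cols (exact)
      (fun row j => row.set j.toNat false)
      (List.replicate cols.toNat true))

-- ===== PRECONDITION & SPEC =====
def Spec_make_intersection_Matrix_with_bool_Values_from (first_seq : String) (second_seq : String) (window_length : Int) (out : List (List Bool)) : Prop := out = make_intersection_Matrix_with_bool_Values_from_alt first_seq second_seq window_length
instance (first_seq : String) (second_seq : String) (window_length : Int) (out : List (List Bool)) : Decidable (Spec_make_intersection_Matrix_with_bool_Values_from first_seq second_seq window_length out) := by unfold Spec_make_intersection_Matrix_with_bool_Values_from; infer_instance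

-- ===== CLAIM (what is proved, stated in full; the proofs are below) =====
def Claim_equal_make_intersection_Matrix_with_bool_Values_from : Prop := ∀ (first_seq : String) (second_seq : String) (window_length : Int), Dom_make_intersection_Matrix_with_bool_Values_from first_seq second_seq window_length → Spec_make_intersection_Matrix_with_bool_Values_from first_seq second_seq window_length (make_intersection_Matrix_with_bool_Values_from first_seq second_seq window_length)

-- ===== LEMMAS AND PROOFS =====

-- the dict built by B's first loop answers a lookup with exactly the matching positions
theorem pvPositions_getD (s : String) (w cols : Int) (pat : String) :
    (((PySem.List.pyRange 0 cols 1).foldl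
        (fun (d : PySem.Dict String (List Int)) j =>
          d.modify (PySem.Str.slice s (some j) (some (j + w))) [] (· ++ [j]))
        PySem.Dict.empty).getD pat [])
    = (PySem.List.pyRange 0 cols 1).filter
        (fun j => PySem.Str.slice s (some j) (some (j + w)) == pat) := by
  have h1 : ((PySem.List.pyRange 0 cols 1).foldl
        (fun (d : PySem.Dict String (List Int)) j =>
          d.modify (PySem.Str.slice s (some j) (some (j + w))) [] (· ++ [j]))
        PySem.Dict.empty)
      = (((PySem.List.pyRange 0 cols 1).map
          (fun j => (PySem.Str.slice s (some j) (some (j + w)), j))).foldl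
          (fun (d : PySem.Dict String (List Int)) p => d.modify p.1 [] (· ++ [p.2]))
          PySem.Dict.empty) := by
    rw [List.foldl_map]
  rw [h1, PySem.Dict.getD_foldl_modify_append, PySem.Dict.getD_empty, List.filter_map,
    List.map_map]
  simp [Function.comp_def]

-- the marking loop preserves the row length
theorem pvMark_length (L : List Int) (r0 : List Bool) :
    (L.foldl (fun (r : List Bool) j => r.set j.toNat false) r0).length = r0.length := by
  induction L generalizing r0 with
  | nil => rfl
  | cons j L ih => simpa [List.foldl_cons] using ih (r0.set j.toNat false)

-- after the marking loop a cell reads false iff its index occurs among the marks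
theorem pvMark_getD (L : List Int) (hL : ∀ j ∈ L, 0 ≤ j) (r0 : List Bool) (k : Nat)
    (hk : k < r0.length) :
    (L.foldl (fun r j => r.set j.toNat false) r0).getD k false
    = if (k : Int) ∈ L then false else r0.getD k false := by
  induction L generalizing r0 with
  | nil => simp
  | cons j L ih =>
      have hj : 0 ≤ j := hL j (List.mem_cons_self)
      have hL' : ∀ x ∈ L, 0 ≤ x := fun x hx => hL x (List.mem_cons_of_mem _ hx)
      rw [List.foldl_cons, ih hL' _ (by simpa using hk)]
      by_cases hkj : (k : Int) = j
      · have hkj' : j.toNat = k := by omega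
        have hset : (r0.set j.toNat false).getD k false = false := by
          simp [List.getD_eq_getElem?_getD, hkj', List.getElem?_set_self hk]
        conv_rhs => rw [if_pos (show (k:Int) ∈ j::L by simp [hkj])]
        split_ifs with h
        · rfl
        · simpa [List.getD_eq_getElem?_getD] using hset
      · have hkj' : j.toNat ≠ k := by omega
        have : (r0.set j.toNat false).getD k false = r0.getD k false := by
          simp [List.getD_eq_getElem?_getD, List.getElem?_set_ne hkj']
        rw [this]
        simp [List.mem_cons, hkj]

-- ===== VERDICT (by name: the statement is the Claim_ definition above) =====
theorem make_intersection_Matrix_with_bool_Values_from_spec : Claim_equal_make_intersection_Matrix_with_bool_Values_from := by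
  intro first_seq second_seq window_length _
  unfold Spec_make_intersection_Matrix_with_bool_Values_from
  unfold make_intersection_Matrix_with_bool_Values_from make_intersection_Matrix_with_bool_Values_from_alt
  set w := window_length
  set cols := PySem.Str.len first_seq - w with hcols
  simp only []
  apply List.map_congr_left
  intro i hi
  set Fi := PySem.Str.slice first_seq (some i) (some (i + w)) with hFi
  rw [pvPositions_getD]
  set L := (PySem.List.pyRange 0 cols 1).filter
      (fun j => PySem.Str.slice second_seq (some j) (some (j + w)) == Fi) with hLdef
  have hL : ∀ j ∈ L, 0 ≤ j := by
    intro j hj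
    have := (List.mem_filter.mp hj).1
    exact ((PySem.List.mem_pyRange_one).mp this).1
  apply List.ext_getElem
  · rw [pvMark_length]
    simp [PySem.List.length_pyRange_one]
  · intro k h1 h2
    have hkc : k < cols.toNat := by
      simpa [PySem.List.length_pyRange_one] using h1
    rw [List.getElem_map, PySem.List.getElem_pyRange_one]
    rw [← List.getD_eq_getElem _ false,
      pvMark_getD L hL _ k (by simpa using hkc)]
    have hmem : ((k : Int) ∈ L) ↔ (PySem.Str.slice second_seq (some (k:Int)) (some ((k:Int) + w)) = Fi) := by
      rw [hLdef, List.mem_filter]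
      constructor
      · intro ⟨_, h⟩; exact eq_of_beq (by simpa using h)
      · intro h
        exact ⟨(PySem.List.mem_pyRange_one).mpr ⟨by positivity, by omega⟩, by simpa using h⟩
    by_cases heq : PySem.Str.slice second_seq (some (k:Int)) (some ((k:Int) + w)) = Fi
    · rw [if_pos (hmem.mpr heq)]
      simp [heq, zero_add]
    · rw [if_neg (fun h => heq (hmem.mp h))]
      simp only [zero_add]
      simp [List.getD_eq_getElem?_getD, hkc]
      intro h; exact heq h.symm
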